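-- pv_equiv track=rewrite | github.com/PeterWiIIiam/cs110 | wordfind/wordfind.py | find_all_possible_letters
-- ===== SOURCE A (Python) =====
-- def find_all_possible_letters(words,myGrid,word):
--     """This function finds the coordinates of letters of word in words. For
--     example. If the word is meow, the function finds the coordinates of all
--     the "m","e","o","w" in myGrid """
--
--     all_possible_letters =[]
--
--     for letter in word:
--         #initialize coordinates_letter every time so that it only carries
--         #possible coordinates for one letter.
--         coordinates_letter = []
--         for y in range(len(myGrid)):
--             for x in range(len(myGrid[y])):
--                 #Find the same letter from word in the grid. The letter in
--                 #the grid could be capitalized since it could be found prior.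
--                 if myGrid[y][x] == letter\
--                 or myGrid[y][x] == letter.upper():
--                     #append the possible coordinates of one letter.
--                     coordinates_letter.append([y,x])
--         #append the possible coordinates of letters of each word.
--         all_possible_letters.append(coordinates_letter)
--     return all_possible_letters
-- ===== SOURCE B (Python) =====
-- def find_all_possible_letters(words, myGrid, word):
--     """Single pass over the grid builds a letter -> coordinates index (each cell
--     is filed under itself and, if it has one, its lowercase form); each letter of
--     word is then a dictionary lookup."""
--     pairs = [(key, [y, x])
--              for y, row in enumerate(myGrid)
--              for x, cell in enumerate(row)
--              for key in ([cell] if cell.lower() == cell else [cell, cell.lower()])]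
--     index = {}
--     for key, coord in pairs:
--         index.setdefault(key, []).append(coord)
--     return [list(index.get(letter, [])) for letter in word]
-- ===== Notes on version B (the rewrite author's own statement) =====
-- stated objective: faster
-- what changed: Instead of rescanning the whole grid for every letter of the word, B makes one pass over the grid building a dict from each cell (and its lowercase form) to its coordinate list, then answers each letter by a single dict lookup.
import Mathlib
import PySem

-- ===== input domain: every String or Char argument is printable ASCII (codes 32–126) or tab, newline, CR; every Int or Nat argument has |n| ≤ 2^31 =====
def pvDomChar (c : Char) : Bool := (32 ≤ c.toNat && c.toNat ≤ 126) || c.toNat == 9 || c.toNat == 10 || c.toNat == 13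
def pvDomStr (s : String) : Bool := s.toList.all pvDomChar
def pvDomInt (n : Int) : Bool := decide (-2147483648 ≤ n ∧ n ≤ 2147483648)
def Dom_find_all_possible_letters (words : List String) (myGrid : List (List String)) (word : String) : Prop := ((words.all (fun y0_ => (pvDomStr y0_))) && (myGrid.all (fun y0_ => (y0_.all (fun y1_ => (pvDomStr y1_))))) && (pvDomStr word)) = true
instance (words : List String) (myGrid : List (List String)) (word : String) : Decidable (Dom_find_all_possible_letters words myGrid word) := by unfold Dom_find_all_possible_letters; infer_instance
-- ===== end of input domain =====

-- B builds a cell->coordinates index in one grid pass, then each letter is a lookup (asymptotically faster than A's per-letter grid scan).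

-- ===== PORT A =====
def find_all_possible_letters (words : List String) (myGrid : List (List String)) (word : String) : List (List (List Int)) :=
  word.toList.foldl (fun all_possible_letters letter =>
    all_possible_letters ++
      [(PySem.List.pyRange 0 (myGrid.length : Int) 1).foldl (fun coordinates_letter y =>
        (PySem.List.pyRange 0 ((PySem.List.pyGetD myGrid y []).length : Int) 1).foldl (fun coordinates_letter x =>
          if PySem.List.pyGetD (PySem.List.pyGetD myGrid y []) x "" == String.ofList [letter] ||
             PySem.List.pyGetD (PySem.List.pyGetD myGrid y []) x "" == PySem.Str.upper (String.ofList [letter])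
          then coordinates_letter ++ [[y, x]]
          else coordinates_letter) coordinates_letter) []]) []

-- ===== PORT B =====
def find_all_possible_letters_alt (words : List String) (myGrid : List (List String)) (word : String) : List (List (List Int)) :=
  let pairs : List (String × List Int) :=
    (PySem.List.enumerate myGrid).flatMap (fun yrow =>
      (PySem.List.enumerate yrow.2).flatMap (fun xcell =>
        (if PySem.Str.lower xcell.2 == xcell.2 then [xcell.2] else [xcell.2, PySem.Str.lower xcell.2]).map
          (fun key => (key, ([yrow.1, xcell.1] : List Int)))))
  let index : PySem.Dict String (List (List Int)) :=
    pairs.foldl (fun d p => d.modify p.1 [] (· ++ [p.2])) PySem.Dict.empty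
  word.toList.map (fun letter => index.getD (String.ofList [letter]) [])

-- ===== PRECONDITION & SPEC =====
def Spec_find_all_possible_letters (words : List String) (myGrid : List (List String)) (word : String) (out : List (List (List Int))) : Prop := out = find_all_possible_letters_alt words myGrid word
instance (words : List String) (myGrid : List (List String)) (word : String) (out : List (List (List Int))) : Decidable (Spec_find_all_possible_letters words myGrid word out) := by unfold Spec_find_all_possible_letters; infer_instance

-- ===== CLAIM (what is proved, stated in full; the proofs are below) =====
def Claim_equal_find_all_possible_letters : Prop := ∀ (words : List String) (myGrid : List (List String)) (word : String), Dom_find_all_possible_letters words myGrid word → Spec_find_all_possible_letters words myGrid word (find_all_possible_letters words myGrid word)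

-- ===== LEMMAS AND PROOFS =====

lemma char_le_iff (c a : Char) : (c ≤ a) ↔ c.toNat ≤ a.toNat := by
  rw [Char.le_def, UInt32.le_iff_toNat_le]; exact Iff.rfl

lemma char_eq_iff (a b : Char) : (a = b) ↔ a.toNat = b.toNat := by
  rw [Char.ext_iff, ← UInt32.toNat_inj]; exact Iff.rfl

lemma toNat_ofNat_valid (n : Nat) (h : n < 0xd800) : (Char.ofNat n).toNat = n := by
  have hv : n.isValidChar := Or.inl h
  unfold Char.ofNat
  rw [dif_pos hv]
  rfl

-- the heart of the case analysis: a cell character matches a letter (directly or as its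
-- uppercase form, A's test) iff it is the letter or lowercases to it (B's index keys)
lemma charKey (a b : Char) :
    (a = b ∨ (PySem.Chars.lowerChar a ≠ a ∧ PySem.Chars.lowerChar a = b)) ↔
    (a = b ∨ a = PySem.Chars.upperChar b) := by
  unfold PySem.Chars.lowerChar PySem.Chars.upperChar PySem.Chars.isupper PySem.Chars.islower
  have hiffa : ((decide ('A' ≤ a) && decide (a ≤ 'Z')) = true) ↔ (65 ≤ a.toNat ∧ a.toNat ≤ 90) := by
    simp only [Bool.and_eq_true, decide_eq_true_eq, char_le_iff]
    exact Iff.rfl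
  have hiffb : ((decide ('a' ≤ b) && decide (b ≤ 'z')) = true) ↔ (97 ≤ b.toNat ∧ b.toNat ≤ 122) := by
    simp only [Bool.and_eq_true, decide_eq_true_eq, char_le_iff]
    exact Iff.rfl
  by_cases hu : 65 ≤ a.toNat ∧ a.toNat ≤ 90 <;> by_cases hl : 97 ≤ b.toNat ∧ b.toNat ≤ 122
  · rw [if_pos (hiffa.mpr hu), if_pos (hiffb.mpr hl)]
    simp only [ne_eq, char_eq_iff, toNat_ofNat_valid (a.toNat + 32) (by omega),
      toNat_ofNat_valid (b.toNat - 32) (by omega)]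
    omega
  · rw [if_pos (hiffa.mpr hu), if_neg (fun h => hl (hiffb.mp h))]
    simp only [ne_eq, char_eq_iff, toNat_ofNat_valid (a.toNat + 32) (by omega)]
    omega
  · rw [if_neg (fun h => hu (hiffa.mp h)), if_pos (hiffb.mpr hl)]
    simp only [ne_eq, char_eq_iff, toNat_ofNat_valid (b.toNat - 32) (by omega)]
    omega
  · rw [if_neg (fun h => hu (hiffa.mp h)), if_neg (fun h => hl (hiffb.mp h))]
    simp only [ne_eq, char_eq_iff]
    omega


lemma str_eq_iff (s t : String) : s = t ↔ s.toList = t.toList := by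
  constructor
  · intro h; rw [h]
  · intro h; rw [← @String.ofList_toList s, ← @String.ofList_toList t, h]

lemma matchIff (cell : String) (c : Char) :
    (cell = String.ofList [c] ∨ cell = PySem.Str.upper (String.ofList [c])) ↔
    (cell = String.ofList [c] ∨ (PySem.Str.lower cell ≠ cell ∧ PySem.Str.lower cell = String.ofList [c])) := by
  simp only [ne_eq, str_eq_iff, PySem.Str.toList_upper, PySem.Str.toList_lower, String.toList_ofList]
  show _ ∨ cell.toList = PySem.Chars.upper [c] ↔ _
  unfold PySem.Chars.upper PySem.Chars.lower
  match _hl : cell.toList with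
  | [] => simp
  | [a] => simpa using (charKey a c).symm
  | a :: b :: t => simp

lemma keyFilter (cell : String) (c : Char) (coord : List Int) :
    (((if PySem.Str.lower cell == cell then [cell] else [cell, PySem.Str.lower cell]).map
        (fun key => (key, coord))).filter (fun p => p.1 == String.ofList [c])).map (fun p => p.2)
    = if (cell == String.ofList [c] || cell == PySem.Str.upper (String.ofList [c])) then [coord] else [] := by
  have hm := matchIff cell c
  simp only [beq_iff_eq, Bool.or_eq_true]
  split_ifs with h1 <;>
    simp only [List.map_cons, List.map_nil, List.filter_cons, List.filter_nil, beq_iff_eq] <;>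
    split_ifs <;> simp_all

lemma filterMap_flatMap {α β γ : Type} (l : List α) (g : α → List β) (p : β → Bool) (f : β → γ) :
    ((l.flatMap g).filter p).map f = l.flatMap (fun a => (((g a).filter p).map f)) := by
  induction l with
  | nil => rfl
  | cons a t ih => simp [List.flatMap_cons, List.filter_append, ih]

lemma filter_map_eq_flatMap {α β : Type} (p : α → Bool) (f : α → β) (l : List α) :
    (l.filter p).map f = l.flatMap (fun x => if p x then [f x] else []) := by
  induction l with
  | nil => rfl
  | cons a t ih => by_cases h : p a <;> simp [h, ih]

-- ===== VERDICT (by name: the statement is the Claim_ definition above) =====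
theorem find_all_possible_letters_spec : Claim_equal_find_all_possible_letters := by
  intro words myGrid word _
  unfold Spec_find_all_possible_letters find_all_possible_letters find_all_possible_letters_alt
  rw [PySem.List.foldl_append_singleton_eq_map]
  simp only [List.nil_append]
  apply List.map_congr_left
  intro c _
  rw [PySem.Dict.getD_foldl_modify_append, PySem.Dict.getD_empty, List.nil_append]
  simp only [filterMap_flatMap, PySem.List.foldl_append_if, PySem.List.foldl_append_eq_flatMap,
    List.nil_append, keyFilter]
  rw [PySem.List.enumerate_eq_map_pyRange myGrid [], List.flatMap_map]
  simp only [PySem.List.len]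
  refine congrArg (fun f => List.flatMap f (PySem.List.pyRange 0 (myGrid.length : Int))) (funext fun y => ?_)
  rw [PySem.List.enumerate_eq_map_pyRange (PySem.List.pyGetD myGrid y []) "", List.flatMap_map,
    filter_map_eq_flatMap]
  simp only [PySem.List.len]
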